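-- pv_equiv track=rewrite | github.com/Salmoneer/advent | 2023/day12_a.py | join_replacements
-- ===== SOURCE A (Python) =====
-- def join_replacements(string, replacements):
--     out = ""
--
--     r = iter(replacements)
--
--     for c in string:
--         if c == "?":
--             out += next(r)
--         else:
--             out += c
--
--     return out
-- ===== SOURCE B (Python) =====
-- def join_replacements(string, replacements):
--     parts = string.split('?')
--     r = iter(replacements)
--     out = [parts[0]]
--     for part in parts[1:]:
--         out.append(next(r))
--         out.append(part)
--     return ''.join(out)
-- ===== Notes on version B (the rewrite author's own statement) =====
-- stated objective: faster
-- what changed: B splits the string on '?' once and interleaves the literal segments with one replacement per gap, joining the pieces once at the end, instead of A's per-character scan with repeated string += accumulation.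
import Mathlib
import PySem

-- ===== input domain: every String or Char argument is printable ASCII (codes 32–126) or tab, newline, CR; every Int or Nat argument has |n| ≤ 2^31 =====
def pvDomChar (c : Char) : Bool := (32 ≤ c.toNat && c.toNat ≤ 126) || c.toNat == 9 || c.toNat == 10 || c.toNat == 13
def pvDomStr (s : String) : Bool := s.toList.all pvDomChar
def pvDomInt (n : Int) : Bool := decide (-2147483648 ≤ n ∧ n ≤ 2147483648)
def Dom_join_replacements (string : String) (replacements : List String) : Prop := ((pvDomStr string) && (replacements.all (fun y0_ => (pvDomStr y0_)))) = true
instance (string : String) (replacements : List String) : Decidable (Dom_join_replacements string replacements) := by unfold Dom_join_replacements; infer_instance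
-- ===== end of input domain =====

-- B re-implements A by a different decomposition: split on '?' once, then interleave the
-- segments with one replacement per gap, instead of A's per-character scan; return values only,
-- equal on Pre_ (enough replacements for the '?'s; both raise StopIteration otherwise).

-- ===== PORT A =====
-- A's per-character loop: '?' consumes the next replacement, any other char is copied.
-- On the char list; the [] case of the inner match is Python's StopIteration (excluded by Pre_).
def joinRepA : List Char → List String → List Char
  | [], _ => []
  | c :: cs, rs =>
    if c = '?' then
      match rs with
      | [] => []                    -- next(r) raises StopIteration here; outside Pre_
      | r :: rs' => r.toList ++ joinRepA cs rs'
    else c :: joinRepA cs rs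

def join_replacements (string : String) (replacements : List String) : String :=
  String.ofList (joinRepA string.toList replacements)

-- ===== PORT B =====
-- One replacement pulled per gap, followed by the segment after that gap (Source B's loop body).
def altGaps : List (List Char) → List String → List (List Char)
  | [], _ => []
  | p :: ps, rs =>
    match rs with
    | [] => []                      -- next(r) raises StopIteration here; outside Pre_
    | r :: rs' => r.toList :: p :: altGaps ps rs'

def join_replacements_alt (string : String) (replacements : List String) : String :=
  match PySem.Chars.splitOn string.toList ['?'] with
  | [] => ""                        -- unreachable: str.split never returns an empty list
  | p :: ps => String.ofList (PySem.Chars.join [] (p :: altGaps ps replacements))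

-- ===== PRECONDITION & SPEC =====
-- Pre_ excludes exactly the inputs with more '?' than replacements, on which A raises StopIteration.
def Pre_join_replacements (string : String) (replacements : List String) : Prop :=
  string.toList.count '?' ≤ replacements.length

instance (string : String) (replacements : List String) : Decidable (Pre_join_replacements string replacements) := by
  unfold Pre_join_replacements; infer_instance

def pvWitness_join_replacements : String × List String := ("a?b?c", ["x", "yz"])

def Spec_join_replacements (string : String) (replacements : List String) (out : String) : Prop := out = join_replacements_alt string replacements
instance (string : String) (replacements : List String) (out : String) : Decidable (Spec_join_replacements string replacements out) := by unfold Spec_join_replacements; infer_instance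

-- ===== CLAIM (what is proved, stated in full; the proofs are below) =====
def Claim_equal_join_replacements : Prop := ∀ (string : String) (replacements : List String), Dom_join_replacements string replacements → Pre_join_replacements string replacements → Spec_join_replacements string replacements (join_replacements string replacements)

-- ===== LEMMAS AND PROOFS =====

-- Single-character splitter with an accumulator: the spec of splitOn for sep = ['?'].
def splitQAux : List Char → List Char → List (List Char)
  | [], cur => [cur.reverse]
  | x :: rest, cur => if x = '?' then cur.reverse :: splitQAux rest [] else splitQAux rest (x :: cur)

lemma splitQAux_ne_nil (l cur : List Char) : splitQAux l cur ≠ [] := by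
  cases l with
  | nil => simp [splitQAux]
  | cons x rest => simp only [splitQAux]; split_ifs <;> simp [splitQAux_ne_nil]

lemma splitOn_go_single (fuel : Nat) (l cur : List Char) (acc : List (List Char))
    (h : l.length ≤ fuel) :
    PySem.Chars.splitOn.go ['?'] fuel l cur acc = acc.reverse ++ splitQAux l cur := by
  induction fuel generalizing l cur acc with
  | zero =>
    have : l = [] := List.eq_nil_of_length_eq_zero (Nat.le_zero.mp h)
    subst this
    simp [PySem.Chars.splitOn.go, splitQAux]
  | succ n ih =>
    cases l with
    | nil => simp [PySem.Chars.splitOn.go, splitQAux]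
    | cons c rest =>
      simp only [PySem.Chars.splitOn.go]
      by_cases hc : c = '?'
      · subst hc
        have hp : List.isPrefixOf ['?'] ('?' :: rest) = true := by
          simp [List.isPrefixOf]
        simp only [hp, if_true, List.length_cons, List.length_nil, List.drop_succ_cons,
          List.drop_zero]
        rw [ih rest [] (cur.reverse :: acc) (by simpa using Nat.le_of_succ_le_succ h)]
        simp [splitQAux]
      · have hp : List.isPrefixOf ['?'] (c :: rest) = false := by
          simp only [List.isPrefixOf, Bool.and_eq_false_iff, beq_eq_false_iff_ne, ne_eq]
          exact Or.inl fun h => hc h.symm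
        simp only [hp, Bool.false_eq_true, if_false]
        rw [ih rest (c :: cur) acc (by simpa using Nat.le_of_succ_le_succ h)]
        simp [splitQAux, hc]

lemma splitOn_single (s : List Char) :
    PySem.Chars.splitOn s ['?'] = splitQAux s [] := by
  show PySem.Chars.splitOn.go ['?'] (s.length + 1) s [] [] = splitQAux s []
  rw [splitOn_go_single (s.length + 1) s [] [] (Nat.le_succ _)]
  simp

-- Interleave the segments ps after a first segment with one replacement per gap, flattened.
def gapsFlat : List (List Char) → List String → List Char
  | [], _ => []
  | p :: ps, rs =>
    match rs with
    | [] => []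
    | r :: rs' => r.toList ++ p ++ gapsFlat ps rs'

lemma intercalate_nil_flatten (l : List (List Char)) : List.intercalate [] l = l.flatten := by
  induction l with
  | nil => simp [List.intercalate]
  | cons a t ih =>
    cases t with
    | nil => simp [List.intercalate]
    | cons b t' => simp_all [List.intercalate, List.intersperse]

lemma join_altGaps (p : List Char) (ps : List (List Char)) (rs : List String) :
    PySem.Chars.join [] (p :: altGaps ps rs) = p ++ gapsFlat ps rs := by
  simp only [PySem.Chars.join, intercalate_nil_flatten]
  induction ps generalizing p rs with
  | nil => simp [altGaps, gapsFlat]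
  | cons q qs ih =>
    cases rs with
    | nil => simp [altGaps, gapsFlat]
    | cons r rs' =>
      simp only [altGaps, gapsFlat, List.flatten_cons]
      have h2 := ih q rs'
      simp only [List.flatten_cons] at h2
      simp [List.append_cancel_left h2]

-- The key invariant: A's scan equals the interleave of the single-char split.
lemma joinRepA_eq_split (cs : List Char) (rs : List String) (cur : List Char)
    (h : cs.count '?' ≤ rs.length) :
    cur.reverse ++ joinRepA cs rs =
      match splitQAux cs cur with
      | [] => []
      | p :: ps => p ++ gapsFlat ps rs := by
  induction cs generalizing rs cur with
  | nil => simp [joinRepA, splitQAux, gapsFlat]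
  | cons c rest ih =>
    by_cases hc : c = '?'
    · subst hc
      cases rs with
      | nil => simp at h
      | cons r rs' =>
        have h' : rest.count '?' ≤ rs'.length := by
          simp at h; omega
        simp only [joinRepA, splitQAux, reduceIte]
        have := ih rs' [] h'
        simp only [List.reverse_nil, List.nil_append] at this
        rw [this]
        cases hsp : splitQAux rest [] with
        | nil => exact absurd hsp (splitQAux_ne_nil rest [])
        | cons p ps => simp [gapsFlat]
    · have h' : rest.count '?' ≤ rs.length := by
        simp [hc] at h ⊢; omega
      simp only [joinRepA, splitQAux, if_neg hc]
      have := ih rs (c :: cur) h'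
      simp only [List.reverse_cons] at this
      rw [← this]
      simp

-- ===== VERDICT (by name: the statement is the Claim_ definition above) =====
theorem join_replacements_spec : Claim_equal_join_replacements := by
  intro s rs _ hpre
  unfold Spec_join_replacements join_replacements join_replacements_alt
  rw [splitOn_single]
  have h := joinRepA_eq_split s.toList rs [] hpre
  simp only [List.reverse_nil, List.nil_append] at h
  cases hsp : splitQAux s.toList [] with
  | nil => exact absurd hsp (splitQAux_ne_nil s.toList [])
  | cons p ps =>
    rw [hsp] at h
    simp only [h, join_altGaps]
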